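-- pv_equiv track=rewrite | github.com/rcs333/VAPiD | ClinVirusSeq.py | find_loc_in_our_seq_from_reference
-- ===== SOURCE A (Python) =====
-- def find_loc_in_our_seq_from_reference(start, our_seq, reference_seq):
--     ref_index = 0
--     # this converts our index into 0 based
--     count = start
--     while count > 0:
--         nt = reference_seq[ref_index]
--         if nt != '-':
--             count -= 1
--         ref_index += 1
--
--     our_index = 0
--     for x in range(0, ref_index):
--         nt = our_seq[x]
--         if nt != '-':
--             our_index += 1
--
--     return our_index
-- ===== SOURCE B (Python) =====
-- def find_loc_in_our_seq_from_reference(start, our_seq, reference_seq):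
--     # Single interleaved pass over the two sequences zipped together: walk
--     # reference and our sequence in lockstep, counting down the needed non-gap
--     # reference characters while counting up the non-gap characters seen in
--     # our sequence over the same span. No index arithmetic, no staged passes.
--     remaining = start
--     our_index = 0
--     for rc, oc in zip(reference_seq, our_seq):
--         if remaining <= 0:
--             break
--         if rc != '-':
--             remaining -= 1
--         if oc != '-':
--             our_index += 1
--     return our_index
-- ===== Notes on version B (the rewrite author's own statement) =====
-- stated objective: alternative
-- what changed: B replaces A's two staged index-based loops (a while-loop advancing ref_index over the reference, then a range loop re-indexing our_seq) by one fused pass over zip(reference_seq, our_seq) that maintains both counters simultaneously, with no index variables at all.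
import Mathlib
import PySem

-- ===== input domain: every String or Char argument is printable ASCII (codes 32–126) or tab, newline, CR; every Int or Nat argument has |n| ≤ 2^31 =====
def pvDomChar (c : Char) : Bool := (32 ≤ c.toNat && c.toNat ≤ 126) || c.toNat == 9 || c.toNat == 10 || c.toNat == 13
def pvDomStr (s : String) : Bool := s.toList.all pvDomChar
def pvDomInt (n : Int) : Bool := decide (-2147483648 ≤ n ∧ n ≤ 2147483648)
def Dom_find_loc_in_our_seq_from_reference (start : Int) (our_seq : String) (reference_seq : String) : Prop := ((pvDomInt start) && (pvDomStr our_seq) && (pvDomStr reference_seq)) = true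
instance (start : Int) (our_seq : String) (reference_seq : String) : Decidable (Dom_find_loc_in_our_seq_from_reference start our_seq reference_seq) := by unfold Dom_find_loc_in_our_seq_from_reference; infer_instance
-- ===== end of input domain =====

-- B fuses A's two staged index-based loops into one interleaved pass over the zipped
-- character pairs, maintaining both counters at once (alternative decomposition, same cost).

-- ===== PORT A =====
-- the 'while count > 0' loop: walks the reference characters, incrementing ref_index
-- (on an exhausted list Python raises IndexError; those inputs are outside Pre_)
def pvRefScan : Int → List Char → Nat → Nat
  | _, [], idx => idx
  | count, c :: rest, idx =>
    if count ≤ 0 then idx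
    else pvRefScan (if c = '-' then count else count - 1) rest (idx + 1)

def find_loc_in_our_seq_from_reference (start : Int) (our_seq : String) (reference_seq : String) : Int :=
  let ref_index := pvRefScan start reference_seq.toList 0
  -- for x in range(0, ref_index): nt = our_seq[x]; if nt != '-': our_index += 1
  -- (pyGet? = none is Python's IndexError; outside Pre_)
  (PySem.List.pyRange 0 (ref_index : Int) 1).foldl (fun acc x =>
    match PySem.List.pyGet? our_seq.toList x with
    | some c => if c = '-' then acc else acc + 1
    | none => acc) 0

-- ===== PORT B =====
-- Source B's single loop: for rc, oc in zip(reference_seq, our_seq): break on remaining <= 0,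
-- decrement remaining on non-gap rc, increment our_index on non-gap oc
def pvZipScan : Int → Int → List (Char × Char) → Int
  | _, our_index, [] => our_index
  | remaining, our_index, (rc, oc) :: rest =>
    if remaining ≤ 0 then our_index
    else pvZipScan (if rc = '-' then remaining else remaining - 1)
                   (if oc = '-' then our_index else our_index + 1) rest

def find_loc_in_our_seq_from_reference_alt (start : Int) (our_seq : String) (reference_seq : String) : Int :=
  pvZipScan start 0 (reference_seq.toList.zip our_seq.toList)

-- ===== PRECONDITION & SPEC =====
-- Pre_ excludes exactly the inputs where Python A raises IndexError: a positive start with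
-- either too few non-gap characters in reference_seq or an our_seq shorter than the needed
-- reference prefix.
def Pre_find_loc_in_our_seq_from_reference (start : Int) (our_seq : String) (reference_seq : String) : Prop :=
  start ≤ 0 ∨ ∃ j : Fin reference_seq.toList.length,
    (j : Nat) + 1 ≤ our_seq.toList.length ∧
    (((reference_seq.toList.take ((j : Nat) + 1)).countP (fun c => c ≠ '-') : Int) = start) ∧
    reference_seq.toList.get j ≠ '-'
instance (start : Int) (our_seq : String) (reference_seq : String) : Decidable (Pre_find_loc_in_our_seq_from_reference start our_seq reference_seq) := by unfold Pre_find_loc_in_our_seq_from_reference; infer_instance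

def pvWitness_find_loc_in_our_seq_from_reference : Int × String × String := (2, "A-CG", "-AT-G")

def Spec_find_loc_in_our_seq_from_reference (start : Int) (our_seq : String) (reference_seq : String) (out : Int) : Prop := out = find_loc_in_our_seq_from_reference_alt start our_seq reference_seq
instance (start : Int) (our_seq : String) (reference_seq : String) (out : Int) : Decidable (Spec_find_loc_in_our_seq_from_reference start our_seq reference_seq out) := by unfold Spec_find_loc_in_our_seq_from_reference; infer_instance

-- ===== CLAIM (what is proved, stated in full; the proofs are below) =====
def Claim_equal_find_loc_in_our_seq_from_reference : Prop := ∀ (start : Int) (our_seq : String) (reference_seq : String), Dom_find_loc_in_our_seq_from_reference start our_seq reference_seq → Pre_find_loc_in_our_seq_from_reference start our_seq reference_seq → Spec_find_loc_in_our_seq_from_reference start our_seq reference_seq (find_loc_in_our_seq_from_reference start our_seq reference_seq)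


-- ===== LEMMAS AND PROOFS =====

-- proof-side measure: the prefix length of the reference that A's while loop consumes
def pvScanK : Int → List Char → Nat
  | _, [] => 0
  | need, c :: rest =>
    if need ≤ 0 then 0
    else 1 + pvScanK (if c = '-' then need else need - 1) rest

-- A's while loop computes exactly that prefix length
theorem pvRefScan_eq (chars : List Char) : ∀ (count : Int) (idx : Nat),
    pvRefScan count chars idx = idx + pvScanK count chars := by
  induction chars with
  | nil => intro count idx; simp [pvRefScan, pvScanK]
  | cons c rest ih =>
      intro count idx
      simp only [pvRefScan, pvScanK]
      split
      · simp
      · rw [ih]; omega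

-- A's counting loop over range(0, n) counts the non-gap characters of our_seq[:n]
theorem pvFold_eq (m : List Char) : ∀ n : Nat,
    (PySem.List.pyRange 0 (n : Int) 1).foldl (fun acc x =>
      match PySem.List.pyGet? m x with
      | some c => if c = '-' then acc else acc + 1
      | none => acc) 0
    = ((m.take n).countP (fun c => c ≠ '-') : Int) := by
  intro n
  induction n with
  | zero => simp [PySem.List.pyRange_one_eq_nil]
  | succ k ih =>
      rw [show ((k + 1 : Nat) : Int) = (k : Int) + 1 by push_cast; ring,
        PySem.List.pyRange_one_succ_right (by positivity), List.foldl_append, ih]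
      simp only [List.foldl_cons, List.foldl_nil, PySem.List.pyGet?_natCast]
      by_cases hk : k < m.length
      · have ht : m.take (k + 1) = m.take k ++ [m[k]] := by
          rw [List.take_add_one, List.getElem?_eq_getElem hk, Option.toList_some]
        rw [List.getElem?_eq_getElem hk, ht, List.countP_append]
        rcases eq_or_ne m[k] '-' with h | h
        · simp [h]
        · simp [h]
      · have h1 : m.take (k + 1) = m.take k := by
          rw [List.take_of_length_le (by omega), List.take_of_length_le (by omega)]
        rw [List.getElem?_eq_none (by omega), h1]

-- B's fused loop counts the non-gap characters of our_seq over the same prefix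
theorem pvZipScan_eq (ref : List Char) : ∀ (our : List Char) (count acc : Int),
    pvZipScan count acc (ref.zip our)
      = acc + ((our.take (pvScanK count ref)).countP (fun c => c ≠ '-') : Int) := by
  induction ref with
  | nil => intro our count acc; simp [pvZipScan, pvScanK]
  | cons rc rest ih =>
      intro our count acc
      cases our with
      | nil => simp [pvZipScan]
      | cons oc orest =>
          simp only [List.zip_cons_cons, pvZipScan, pvScanK]
          split
          · simp
          · rw [ih, Nat.add_comm, List.take_succ_cons, List.countP_cons]
            rcases eq_or_ne oc '-' with h | h
            · simp [h]
            · have : (decide (oc ≠ '-')) = true := by simp [h]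
              simp [h, this]; ring

-- ===== VERDICT (by name: the statements are the Claim_ definitions above) =====
theorem find_loc_in_our_seq_from_reference_spec : Claim_equal_find_loc_in_our_seq_from_reference := by
  intro start our_seq reference_seq _ _
  unfold Spec_find_loc_in_our_seq_from_reference
  unfold find_loc_in_our_seq_from_reference find_loc_in_our_seq_from_reference_alt
  rw [pvRefScan_eq, Nat.zero_add, pvFold_eq, pvZipScan_eq, zero_add]
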